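-- pv_equiv track=rewrite | github.com/GUCYENER/demo | app/services/document_processors/pdf_processor.py | _detect_table_content
-- ===== SOURCE A (Python) =====
-- def _detect_table_content(text: str) -> bool:
--     """
--     Metin içinde tablo yapısı olup olmadığını tespit eder.
--
--     Kriterler:
--     1. Çoklu | karakteri (pipe separated)
--     2. Tab karakterleri ile ayrılmış sütunlar
--     3. Düzenli boşluk pattern'i (fixed width columns)
--     """
--     lines = text.split('\n')
--
--     # Pipe karakteri sayısı - tablo göstergesi
--     pipe_lines = sum(1 for line in lines if line.count('|') >= 2)
--     if pipe_lines >= 2: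
--         return True
--
--     # Tab ile ayrılmış satırlar
--     tab_lines = sum(1 for line in lines if '\t' in line and line.count('\t') >= 2)
--     if tab_lines >= 2:
--         return True
--
--     return False
-- ===== SOURCE B (Python) =====
-- def _detect_table_content(text: str) -> bool:
--     # One fused pass with early exit: tally pipe-heavy and tab-heavy lines together.
--     pipes = 0
--     tabs = 0
--     for line in text.split('\n'):
--         if line.count('|') >= 2:
--             pipes += 1
--             if pipes == 2:
--                 return True
--         if line.count('\t') >= 2:
--             tabs += 1
--             if tabs == 2:
--                 return True
--     return False
-- ===== Notes on version B (the rewrite author's own statement) =====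
-- stated objective: alternative
-- what changed: Replaces A's two separate full sum-comprehension passes over the split lines with a single fused loop that maintains both counters and returns early as soon as either signal reaches 2.
import Mathlib
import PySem

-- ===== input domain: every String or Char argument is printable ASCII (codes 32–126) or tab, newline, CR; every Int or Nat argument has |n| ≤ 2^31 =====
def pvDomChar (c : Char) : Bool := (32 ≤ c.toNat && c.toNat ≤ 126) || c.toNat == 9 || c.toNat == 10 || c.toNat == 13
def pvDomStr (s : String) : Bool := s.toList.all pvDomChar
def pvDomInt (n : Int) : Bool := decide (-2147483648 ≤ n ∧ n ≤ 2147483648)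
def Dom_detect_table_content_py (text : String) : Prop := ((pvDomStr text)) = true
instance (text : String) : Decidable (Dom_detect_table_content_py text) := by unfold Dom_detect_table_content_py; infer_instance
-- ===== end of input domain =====

-- B fuses A's two separate sum-comprehension passes into one loop with two counters and early exit; same result, alternative decomposition.

-- ===== PORT A =====
def detect_table_content_py (text : String) : Bool :=
  let lines := (PySem.Str.split? text "\n").getD []
  let pipe_lines : Int :=
    lines.foldl (fun acc line => if PySem.Str.count line "|" ≥ 2 then acc + 1 else acc) 0
  if pipe_lines ≥ 2 then true
  else
    let tab_lines : Int :=
      lines.foldl (fun acc line =>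
        if PySem.Str.isIn "\t" line && PySem.Str.count line "\t" ≥ 2 then acc + 1 else acc) 0
    if tab_lines ≥ 2 then true else false

-- ===== PORT B =====
def dtcLoop : List String → Int → Int → Bool
  | [], _, _ => false
  | line :: rest, pipes, tabs =>
    if 2 ≤ PySem.Str.count line "|" then
      if pipes + 1 = 2 then true
      else
        if 2 ≤ PySem.Str.count line "\t" then
          if tabs + 1 = 2 then true else dtcLoop rest (pipes + 1) (tabs + 1)
        else dtcLoop rest (pipes + 1) tabs
    else
      if 2 ≤ PySem.Str.count line "\t" then
        if tabs + 1 = 2 then true else dtcLoop rest pipes (tabs + 1)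
      else dtcLoop rest pipes tabs

def detect_table_content_py_alt (text : String) : Bool :=
  dtcLoop ((PySem.Str.split? text "\n").getD []) 0 0

-- ===== PRECONDITION & SPEC =====
def Spec_detect_table_content_py (text : String) (out : Bool) : Prop := out = detect_table_content_py_alt text
instance (text : String) (out : Bool) : Decidable (Spec_detect_table_content_py text out) := by unfold Spec_detect_table_content_py; infer_instance

-- ===== CLAIM (what is proved, stated in full; the proofs are below) =====
def Claim_equal_detect_table_content_py : Prop := ∀ (text : String), Dom_detect_table_content_py text → Spec_detect_table_content_py text (detect_table_content_py text)

-- ===== LEMMAS AND PROOFS =====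

def pipeB (line : String) : Bool := decide (2 ≤ PySem.Str.count line "|")
def tabB (line : String) : Bool := decide (2 ≤ PySem.Str.count line "\t")

lemma go_prefix (sub : List Char) :
    ∀ (fuel : Nat) (l : List Char) (acc : Nat),
      acc < PySem.Chars.count.go sub fuel l acc → ∃ j, sub <+: l.drop j := by
  intro fuel
  induction fuel with
  | zero => intro l acc h; simp [PySem.Chars.count.go] at h
  | succ n ih =>
    intro l acc h
    match l with
    | [] => simp [PySem.Chars.count.go] at h
    | c :: t =>
      by_cases hp : sub.isPrefixOf (c :: t)
      · exact ⟨0, by simpa using List.isPrefixOf_iff_prefix.mp hp⟩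
      · rw [show PySem.Chars.count.go sub (n+1) (c :: t) acc
              = PySem.Chars.count.go sub n t acc by
            simp [PySem.Chars.count.go, hp]] at h
        obtain ⟨j, hj⟩ := ih t acc h
        exact ⟨j + 1, by simpa using hj⟩

lemma isIn_of_count_ge_two (line : String) (h : 2 ≤ PySem.Str.count line "\t") :
    PySem.Str.isIn "\t" line = true := by
  have hc : 2 ≤ PySem.Chars.count line.toList ['\t'] := by simpa using h
  have hgo : 0 < PySem.Chars.count.go ['\t'] line.toList.length line.toList 0 := by
    have : PySem.Chars.count line.toList ['\t']
        = PySem.Chars.count.go ['\t'] line.toList.length line.toList 0 := by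
      simp [PySem.Chars.count]
    omega
  obtain ⟨j, hj⟩ := go_prefix ['\t'] line.toList.length line.toList 0 hgo
  have := PySem.Chars.exists_prefix_drop_iff_isIn (sub := ['\t']) (s := line.toList) |>.mp ⟨j, hj⟩
  simpa using this

lemma tab_cond_eq (line : String) :
    (PySem.Str.isIn "\t" line && decide (2 ≤ PySem.Str.count line "\t")) = tabB line := by
  by_cases h : 2 ≤ PySem.Str.count line "\t"
  · have hi : PySem.Chars.isIn ['\t'] line.toList = true := by
      simpa using isIn_of_count_ge_two line h
    simp [tabB, h, hi]
  · have hd : decide (2 ≤ PySem.Str.count line "\t") = false := decide_eq_false h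
    simp only [tabB, hd, Bool.and_false]

lemma dtcLoop_eq (ls : List String) (pipes tabs : Int)
    (hp : pipes < 2) (ht : tabs < 2) :
    dtcLoop ls pipes tabs =
      (decide (2 ≤ pipes + (ls.countP pipeB : Int)) ||
       decide (2 ≤ tabs + (ls.countP tabB : Int))) := by
  induction ls generalizing pipes tabs with
  | nil =>
    simp only [dtcLoop, List.countP_nil, Nat.cast_zero, add_zero]
    rw [Bool.eq_iff_iff]
    simp only [Bool.or_eq_true, decide_eq_true_eq, Bool.false_eq_true, false_iff, not_or]
    omega
  | cons line rest ih =>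
    simp only [dtcLoop, List.countP_cons, pipeB, tabB]
    by_cases h1 : 2 ≤ PySem.Str.count line "|" <;>
    by_cases h2 : 2 ≤ PySem.Str.count line "\t" <;>
    by_cases hp1 : pipes + 1 = 2 <;>
    by_cases ht1 : tabs + 1 = 2 <;>
    simp only [h1, h2, hp1, ht1, if_true, if_false, decide_true, decide_false,
      Nat.cast_add, Nat.cast_one] <;>
    first
    | (rw [ih _ _ (by omega) (by omega), Bool.eq_iff_iff]
       simp only [Bool.or_eq_true, decide_eq_true_eq]
       push_cast
       omega)
    | (rw [Bool.eq_iff_iff]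
       simp only [Bool.or_eq_true, decide_eq_true_eq, true_iff]
       push_cast
       omega)

lemma foldl_count_bool (ls : List String) (p : String → Bool) (a : Int) :
    ls.foldl (fun acc line => if p line then acc + 1 else acc) a
      = a + (ls.countP p : Int) := by
  induction ls generalizing a with
  | nil => simp
  | cons x xs ih =>
    simp only [List.foldl_cons, List.countP_cons, ih]
    by_cases h : p x = true <;> simp [h] <;> ring

-- ===== VERDICT (by name: the statement is the Claim_ definition above) =====
theorem detect_table_content_py_spec : Claim_equal_detect_table_content_py := by
  intro text _
  unfold Spec_detect_table_content_py detect_table_content_py detect_table_content_py_alt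
  dsimp only
  set ls := (PySem.Str.split? text "\n").getD [] with hls
  rw [dtcLoop_eq ls 0 0 (by norm_num) (by norm_num)]
  have hpipe : ls.foldl (fun acc line => if PySem.Str.count line "|" ≥ 2 then acc + 1 else acc) (0 : Int)
      = (ls.countP pipeB : Int) := by
    have : ∀ (acc : Int) (line : String),
        (if PySem.Str.count line "|" ≥ 2 then acc + 1 else acc)
          = (if pipeB line then acc + 1 else acc) := by
      intro acc line; simp [pipeB, ge_iff_le]
    simp only [this]
    rw [foldl_count_bool ls pipeB 0]; ring
  have htab : ls.foldl (fun acc line =>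
        if PySem.Str.isIn "\t" line && PySem.Str.count line "\t" ≥ 2 then acc + 1 else acc) (0 : Int)
      = (ls.countP tabB : Int) := by
    have : ∀ (acc : Int) (line : String),
        (if PySem.Str.isIn "\t" line && PySem.Str.count line "\t" ≥ 2 then acc + 1 else acc)
          = (if tabB line then acc + 1 else acc) := by
      intro acc line
      rw [show (PySem.Str.isIn "\t" line && PySem.Str.count line "\t" ≥ 2 : Bool) = tabB line by
        simpa [ge_iff_le] using tab_cond_eq line]
    simp only [this]
    rw [foldl_count_bool ls tabB 0]; ring
  rw [hpipe, htab]
  rw [Bool.eq_iff_iff]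
  by_cases h1 : 2 ≤ (ls.countP pipeB : Int) <;>
    by_cases h2 : 2 ≤ (ls.countP tabB : Int) <;>
    simp [h1, h2]
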